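-- pv_equiv track=rewrite | github.com/topherclay/duotrigordle_and_wordle_chatbot | parsing_stuff.py | add_turn_labels
-- ===== SOURCE A (Python) =====
-- def add_turn_labels(non_labelled: str):
--
--     turn = 1
--     with_turns = f"Turn {turn:02d} "
--     for char in non_labelled:
--         if char == "\n":
--             turn = turn + 4
--             with_turns += f"\nTurn {turn:02d} "
--         else:
--             with_turns += char
--     return with_turns
-- ===== SOURCE B (Python) =====
-- def add_turn_labels(non_labelled: str):
--     lines = non_labelled.split("\n")
--     return "\n".join(f"Turn {1 + 4 * i:02d} {line}" for i, line in enumerate(lines))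
-- ===== Notes on version B (the rewrite author's own statement) =====
-- stated objective: simpler
-- what changed: Replaces the character-by-character scan with a running turn counter by splitting on the newline character, labelling each line via enumerate with the closed-form turn number 1+4*i, and joining with newlines; the join avoids A's repeated string concatenation.
import Mathlib
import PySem

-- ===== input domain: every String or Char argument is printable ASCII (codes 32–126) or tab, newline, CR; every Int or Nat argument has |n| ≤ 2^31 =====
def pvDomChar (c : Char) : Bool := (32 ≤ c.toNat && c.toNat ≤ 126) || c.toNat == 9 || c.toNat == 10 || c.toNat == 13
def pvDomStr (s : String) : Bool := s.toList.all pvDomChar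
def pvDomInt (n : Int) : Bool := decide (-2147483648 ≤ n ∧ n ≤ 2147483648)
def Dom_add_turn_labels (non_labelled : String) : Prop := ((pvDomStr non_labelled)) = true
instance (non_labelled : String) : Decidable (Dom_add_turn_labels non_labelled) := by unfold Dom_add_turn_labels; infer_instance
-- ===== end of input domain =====

-- B replaces A's per-character scan with a running counter by split('\n') + enumerate
-- with the closed-form label 1+4*i + join (simpler decomposition, same cost).

-- ===== PORT A =====
-- f"Turn {turn:02d} " : for the ints that occur, {:02d} = str(turn).zfill(2)
def pvLabel (turn : Int) : List Char :=
  ['T','u','r','n',' '] ++ PySem.Chars.zfill (PySem.Int.toChars turn) 2 ++ [' ']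

def add_turn_labels (non_labelled : String) : String :=
  String.mk
    ((non_labelled.toList.foldl
      (fun (st : Int × List Char) c =>
        if c = '\n' then (st.1 + 4, st.2 ++ '\n' :: pvLabel (st.1 + 4))
        else (st.1, st.2 ++ [c]))
      (1, pvLabel 1)).2)

-- ===== PORT B =====
def add_turn_labels_alt (non_labelled : String) : String :=
  let lines := PySem.Chars.splitOn non_labelled.toList ['\n']
  String.mk (PySem.Chars.join ['\n']
    ((PySem.List.enumerate lines 0).map (fun p => pvLabel (1 + 4 * p.1) ++ p.2)))

-- ===== PRECONDITION & SPEC =====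
def Spec_add_turn_labels (non_labelled : String) (out : String) : Prop := out = add_turn_labels_alt non_labelled
instance (non_labelled : String) (out : String) : Decidable (Spec_add_turn_labels non_labelled out) := by unfold Spec_add_turn_labels; infer_instance

-- ===== CLAIM (what is proved, stated in full; the proofs are below) =====
def Claim_equal_add_turn_labels : Prop := ∀ (non_labelled : String), Dom_add_turn_labels non_labelled → Spec_add_turn_labels non_labelled (add_turn_labels non_labelled)

-- ===== LEMMAS AND PROOFS =====

-- structural characterization of split on the one-char separator '\n'
def pvSplitNL : List Char → List (List Char)
  | [] => [[]]
  | c :: cs =>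
    if c = '\n' then [] :: pvSplitNL cs
    else
      match pvSplitNL cs with
      | [] => [[c]]
      | l :: ls => (c :: l) :: ls

lemma pvSplitNL_ne_nil (cs : List Char) : pvSplitNL cs ≠ [] := by
  induction cs with
  | nil => simp [pvSplitNL]
  | cons c cs ih =>
    simp only [pvSplitNL]
    split
    · simp
    · cases h : pvSplitNL cs <;> simp

lemma splitOn_go_nl (l : List Char) : ∀ (fuel : Nat) (cur : List Char) (acc : List (List Char)),
    l.length < fuel →
    PySem.Chars.splitOn.go ['\n'] fuel l cur acc
      = acc.reverse ++ (match pvSplitNL l with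
          | [] => [cur.reverse]
          | x :: xs => (cur.reverse ++ x) :: xs) := by
  induction l with
  | nil =>
    intro fuel cur acc h
    match fuel, h with
    | fuel + 1, _ => simp [PySem.Chars.splitOn.go, pvSplitNL]
  | cons c rest ih =>
    intro fuel cur acc h
    match fuel, h with
    | fuel + 1, h =>
      by_cases hc : c = '\n'
      · subst hc
        have hpre : List.isPrefixOf ['\n'] ('\n' :: rest) = true := by
          simp [List.isPrefixOf]
        rw [show PySem.Chars.splitOn.go ['\n'] (fuel + 1) ('\n' :: rest) cur acc
              = PySem.Chars.splitOn.go ['\n'] fuel (List.drop 1 ('\n' :: rest)) [] (cur.reverse :: acc) by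
          simp [PySem.Chars.splitOn.go, hpre]]
        simp only [List.drop_succ_cons, List.drop_zero]
        rw [ih fuel [] (cur.reverse :: acc) (Nat.lt_of_succ_lt_succ h)]
        simp only [pvSplitNL]
        cases hs : pvSplitNL rest with
        | nil => exact absurd hs (pvSplitNL_ne_nil rest)
        | cons x xs => simp
      · have hpre : List.isPrefixOf ['\n'] (c :: rest) = false := by
          simp only [List.isPrefixOf, Bool.and_true]
          exact decide_eq_false (fun hh => hc hh.symm)
        rw [show PySem.Chars.splitOn.go ['\n'] (fuel + 1) (c :: rest) cur acc
              = PySem.Chars.splitOn.go ['\n'] fuel rest (c :: cur) acc by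
          simp [PySem.Chars.splitOn.go, hpre]]
        rw [ih fuel (c :: cur) acc (Nat.lt_of_succ_lt_succ h)]
        simp only [pvSplitNL, if_neg hc]
        cases hs : pvSplitNL rest with
        | nil => exact absurd hs (pvSplitNL_ne_nil rest)
        | cons x xs => simp

lemma splitOn_nl (cs : List Char) : PySem.Chars.splitOn cs ['\n'] = pvSplitNL cs := by
  rw [PySem.Chars.splitOn, splitOn_go_nl cs (cs.length + 1) [] [] (Nat.lt_succ_self _)]
  cases hs : pvSplitNL cs with
  | nil => exact absurd hs (pvSplitNL_ne_nil cs)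
  | cons x xs => simp

-- the labelled tail: one '\n' + label + line per remaining line
def pvTail (turn : Int) : List (List Char) → List Char
  | [] => []
  | l :: ls => '\n' :: (pvLabel turn ++ l ++ pvTail (turn + 4) ls)

lemma foldA_eq (cs : List Char) : ∀ (turn : Int) (acc : List Char),
    (cs.foldl
      (fun (st : Int × List Char) c =>
        if c = '\n' then (st.1 + 4, st.2 ++ '\n' :: pvLabel (st.1 + 4))
        else (st.1, st.2 ++ [c]))
      (turn, acc)).2
      = acc ++ (match pvSplitNL cs with
          | [] => []
          | l :: ls => l ++ pvTail (turn + 4) ls) := by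
  induction cs with
  | nil => intro turn acc; simp [pvSplitNL, pvTail]
  | cons c cs ih =>
    intro turn acc
    by_cases hc : c = '\n'
    · subst hc
      simp only [List.foldl_cons]
      rw [ih]
      simp only [pvSplitNL]
      cases hs : pvSplitNL cs with
      | nil => exact absurd hs (pvSplitNL_ne_nil cs)
      | cons l ls => simp [pvTail]
    · simp only [List.foldl_cons, if_neg hc]
      rw [ih]
      simp only [pvSplitNL, if_neg hc]
      cases hs : pvSplitNL cs with
      | nil => exact absurd hs (pvSplitNL_ne_nil cs)
      | cons l ls => simp

lemma tail_eq_join (ls : List (List Char)) : ∀ (k : Int) (l : List Char),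
    pvLabel (1 + 4 * k) ++ l ++ pvTail (1 + 4 * k + 4) ls
      = PySem.Chars.join ['\n']
          ((PySem.List.enumerate (l :: ls) k).map (fun p => pvLabel (1 + 4 * p.1) ++ p.2)) := by
  induction ls with
  | nil =>
    intro k l
    simp [PySem.List.enumerate_cons, PySem.List.enumerate_nil, pvTail,
      PySem.Chars.join_singleton]
  | cons l2 ls ih =>
    intro k l
    simp only [PySem.List.enumerate_cons, List.map_cons]
    rw [PySem.Chars.join_cons_cons]
    have ihh := ih (k + 1) l2
    simp only [PySem.List.enumerate_cons, List.map_cons] at ihh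
    rw [← ihh]
    have e1 : (1 : Int) + 4 * (k + 1) = 1 + 4 * k + 4 := by ring
    rw [e1]
    simp [pvTail]

-- ===== VERDICT (by name: the statement is the Claim_ definition above) =====
theorem add_turn_labels_spec : Claim_equal_add_turn_labels := by
  intro s _
  unfold Spec_add_turn_labels add_turn_labels add_turn_labels_alt
  obtain ⟨l, ls, hs⟩ : ∃ l ls, pvSplitNL s.toList = l :: ls := by
    cases h : pvSplitNL s.toList with
    | nil => exact absurd h (pvSplitNL_ne_nil s.toList)
    | cons x xs => exact ⟨x, xs, rfl⟩
  rw [foldA_eq, splitOn_nl, hs]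
  have h := tail_eq_join ls 0 l
  norm_num [PySem.List.enumerate_cons, List.map_cons, List.append_assoc] at h ⊢
  rw [h]
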